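-- pv_equiv track=rewrite | github.com/piotrsniady/python-exercises-edabit | hard/positive_dominant.py | dominant
-- ===== SOURCE A (Python) =====
-- def dominant(lst: list) -> bool:
--     pos_set = set()
--     neg_set = set()
--
--     for num in lst:
--         if num > 0:
--             pos_set.add(num)
--         else:
--             neg_set.add(num)
--
--     if len(pos_set) > len(neg_set):
--         return True
--     else:
--         return False
-- ===== SOURCE B (Python) =====
-- def dominant(lst: list) -> bool:
--     s = sorted(lst)
--     bal = 0
--     prev = None
--     for x in s:
--         if prev is None or x != prev:
--             bal += 1 if x > 0 else -1
--             prev = x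
--     return bal > 0
-- ===== Notes on version B (the rewrite author's own statement) =====
-- stated objective: alternative
-- what changed: Sort-then-scan instead of set partitioning: sorts the list, skips adjacent duplicates (equal values are adjacent once sorted), and keeps a single signed balance (+1 per unique positive, -1 per unique non-positive), returning balance > 0; no set is built.
import Mathlib
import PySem

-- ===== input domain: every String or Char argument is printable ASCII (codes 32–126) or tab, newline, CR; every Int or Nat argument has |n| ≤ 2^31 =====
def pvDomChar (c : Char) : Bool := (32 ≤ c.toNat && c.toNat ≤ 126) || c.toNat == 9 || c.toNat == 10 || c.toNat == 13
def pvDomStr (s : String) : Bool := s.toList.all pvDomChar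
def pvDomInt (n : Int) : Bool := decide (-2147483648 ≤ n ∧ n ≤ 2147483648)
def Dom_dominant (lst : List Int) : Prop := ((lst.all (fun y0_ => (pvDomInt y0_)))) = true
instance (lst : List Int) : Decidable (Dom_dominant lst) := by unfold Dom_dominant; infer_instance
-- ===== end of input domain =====

-- B: sort-then-scan — sort, skip adjacent duplicates, keep one signed balance (+1 unique positive, -1 unique non-positive) — instead of A's two-set partition (alternative).


-- ===== PORT A =====
def dominant (lst : List Int) : Bool :=
  let st := lst.foldl
    (fun (pn : PySem.Set Int × PySem.Set Int) num =>
      if num > 0 then (PySem.Set.add pn.1 num, pn.2) else (pn.1, PySem.Set.add pn.2 num))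
    (PySem.Set.empty, PySem.Set.empty)
  if PySem.Set.len st.1 > PySem.Set.len st.2 then true else false

-- ===== PORT B =====
-- prev : Option Int models B's 'prev = None' sentinel ('prev is None or x != prev');
-- stepB is one iteration of B's loop body.
def stepB (pb : Option Int × Int) (x : Int) : Option Int × Int :=
  match pb.1 with
  | none => (some x, pb.2 + (if x > 0 then 1 else -1))
  | some p => if x ≠ p then (some x, pb.2 + (if x > 0 then 1 else -1)) else pb

def dominant_alt (lst : List Int) : Bool :=
  decide (((PySem.List.sorted lst (fun x => x) false).foldl stepB (none, 0)).2 > 0)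

-- ===== PRECONDITION & SPEC =====
def Spec_dominant (lst : List Int) (out : Bool) : Prop := out = dominant_alt lst
instance (lst : List Int) (out : Bool) : Decidable (Spec_dominant lst out) := by unfold Spec_dominant; infer_instance

-- ===== CLAIM (what is proved, stated in full; the proofs are below) =====
def Claim_equal_dominant : Prop := ∀ (lst : List Int), Dom_dominant lst → Spec_dominant lst (dominant lst)

-- ===== LEMMAS AND PROOFS =====

-- proof-side model of B's adjacent-duplicate skipping
def ddB : Option Int → List Int → List Int
  | _, [] => []
  | none, x :: t => x :: ddB (some x) t
  | some p, x :: t => if x = p then ddB (some p) t else x :: ddB (some x) t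

def scoreB (l : List Int) : Int :=
  ((l.filter (fun x => decide (x > 0))).length : Int)
    - ((l.filter (fun x => !decide (x > 0))).length : Int)

theorem scoreB_cons (x : Int) (l : List Int) :
    scoreB (x :: l) = (if x > 0 then 1 else -1) + scoreB l := by
  by_cases h : x > 0 <;> simp [scoreB, h] <;> omega

-- B's fold computes the signed score of the adjacent-deduplicated list
theorem foldB_eq (l : List Int) (prev : Option Int) (bal : Int) :
    (l.foldl stepB (prev, bal)).2 = bal + scoreB (ddB prev l) := by
  induction l generalizing prev bal with
  | nil => simp [ddB, scoreB]
  | cons x t ih =>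
    rw [List.foldl_cons]
    cases prev with
    | none =>
      rw [show stepB (none, bal) x = (some x, bal + (if x > 0 then 1 else -1)) from rfl,
        ih, show ddB none (x :: t) = x :: ddB (some x) t from rfl, scoreB_cons]
      ring
    | some p =>
      by_cases h : x = p
      · rw [show stepB (some p, bal) x = (some p, bal) from by simp [stepB, h], ih,
          show ddB (some p) (x :: t) = ddB (some p) t from by simp [ddB, h]]
      · rw [show stepB (some p, bal) x = (some x, bal + (if x > 0 then 1 else -1)) from by
            simp [stepB, h],
          ih, show ddB (some p) (x :: t) = x :: ddB (some x) t from by simp [ddB, h],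
          scoreB_cons]
        ring

-- on a sorted tail whose elements are all ≥ p, ddB (some p) keeps exactly the elements ≠ p, without duplicates
theorem ddB_some_sorted (s : List Int) (p : Int) (hs : s.Pairwise (· ≤ ·))
    (hp : ∀ y ∈ s, p ≤ y) :
    (ddB (some p) s).Nodup ∧ ∀ x, x ∈ ddB (some p) s ↔ (x ∈ s ∧ x ≠ p) := by
  induction s generalizing p with
  | nil => simp [ddB]
  | cons a t ih =>
    have hat : ∀ y ∈ t, a ≤ y := by
      intro y hy; exact (List.pairwise_cons.mp hs).1 y hy
    have ht : t.Pairwise (· ≤ ·) := (List.pairwise_cons.mp hs).2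
    by_cases h : a = p
    · have := ih p ht (by intro y hy; exact hp y (List.mem_cons_of_mem a hy))
      rw [show ddB (some p) (a :: t) = ddB (some p) t from by simp [ddB, h]]
      refine ⟨this.1, fun x => ?_⟩
      rw [this.2]
      constructor
      · rintro ⟨hx, hxp⟩; exact ⟨List.mem_cons_of_mem a hx, hxp⟩
      · rintro ⟨hx, hxp⟩
        rcases List.mem_cons.mp hx with h1 | h1
        · exact absurd (h1.trans h) hxp
        · exact ⟨h1, hxp⟩
    · have hpa : p < a := lt_of_le_of_ne (hp a List.mem_cons_self) (Ne.symm h)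
      have := ih a ht hat
      simp only [ddB, if_neg h]
      constructor
      · refine List.nodup_cons.mpr ⟨?_, this.1⟩
        intro hmem
        exact ((this.2 a).mp hmem).2 rfl
      · intro x
        rw [List.mem_cons, this.2, List.mem_cons]
        constructor
        · rintro (rfl | ⟨hx, hxa⟩)
          · exact ⟨Or.inl rfl, ne_of_gt hpa⟩
          · have : p < x := lt_of_lt_of_le hpa (hat x hx)
            exact ⟨Or.inr hx, ne_of_gt this⟩
        · rintro ⟨h1 | h1, hxp⟩
          · exact Or.inl h1
          · by_cases hxa : x = a
            · exact Or.inl hxa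
            · exact Or.inr ⟨h1, hxa⟩

theorem ddB_none_sorted (s : List Int) (hs : s.Pairwise (· ≤ ·)) :
    (ddB none s).Nodup ∧ ∀ x, x ∈ ddB none s ↔ x ∈ s := by
  cases s with
  | nil => simp [ddB]
  | cons a t =>
    have hat : ∀ y ∈ t, a ≤ y := by
      intro y hy; exact (List.pairwise_cons.mp hs).1 y hy
    have ht : t.Pairwise (· ≤ ·) := (List.pairwise_cons.mp hs).2
    have H := ddB_some_sorted t a ht hat
    simp only [ddB]
    constructor
    · refine List.nodup_cons.mpr ⟨fun hmem => ((H.2 a).mp hmem).2 rfl, H.1⟩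
    · intro x
      rw [List.mem_cons, H.2, List.mem_cons]
      constructor
      · rintro (rfl | ⟨hx, _⟩)
        · exact Or.inl rfl
        · exact Or.inr hx
      · rintro (rfl | h1)
        · exact Or.inl rfl
        · by_cases hxa : x = a
          · exact Or.inl hxa
          · exact Or.inr ⟨h1, hxa⟩

-- A's loop is two independent set-building loops over the two filtered sublists.
theorem dominant_foldl_split (lst : List Int) (p n : PySem.Set Int) :
    lst.foldl
      (fun (pn : PySem.Set Int × PySem.Set Int) num =>
        if num > 0 then (PySem.Set.add pn.1 num, pn.2) else (pn.1, PySem.Set.add pn.2 num))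
      (p, n)
    = ((lst.filter (fun x => decide (x > 0))).foldl PySem.Set.add p,
       (lst.filter (fun x => !decide (x > 0))).foldl PySem.Set.add n) := by
  induction lst generalizing p n with
  | nil => simp
  | cons a t ih =>
    by_cases h : a > 0 <;> simp [h, ih]

-- two Nodup lists with the same membership have equal filter lengths
theorem length_filter_of_same_mem (q : Int → Bool) (u v : List Int)
    (hu : u.Nodup) (hv : v.Nodup) (hm : ∀ x, x ∈ u ↔ x ∈ v) :
    (u.filter q).length = (v.filter q).length := by
  apply List.Perm.length_eq
  apply List.Perm.filter
  rw [List.perm_ext_iff_of_nodup hu hv]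
  exact hm

theorem length_ofList_filter (q : Int → Bool) (lst : List Int) :
    (PySem.Set.ofList (lst.filter q)).length = ((PySem.Set.ofList lst).filter q).length := by
  apply List.Perm.length_eq
  rw [List.perm_ext_iff_of_nodup (PySem.Set.nodup_ofList _)
      ((PySem.Set.nodup_ofList lst).filter q)]
  intro x
  simp [PySem.Set.mem_ofList, List.mem_filter]

-- ===== VERDICT (by name: the statement is the Claim_ definition above) =====
theorem dominant_spec : Claim_equal_dominant := by
  intro lst _
  unfold Spec_dominant dominant dominant_alt
  rw [dominant_foldl_split, foldB_eq]
  have hs : (PySem.List.sorted lst (fun x => x) false).Pairwise (· ≤ ·) := by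
    simpa using PySem.List.sorted_pairwise lst (fun x => x)
  have hdd := ddB_none_sorted _ hs
  have hmem : ∀ x, x ∈ ddB none (PySem.List.sorted lst (fun x => x) false) ↔
      x ∈ PySem.Set.ofList lst := by
    intro x
    rw [(hdd.2 x), PySem.List.mem_sorted, PySem.Set.mem_ofList]
  have h1 := length_filter_of_same_mem (fun x => decide (x > 0)) _ _
    hdd.1 (PySem.Set.nodup_ofList lst) hmem
  have h2 := length_filter_of_same_mem (fun x => !decide (x > 0)) _ _
    hdd.1 (PySem.Set.nodup_ofList lst) hmem
  simp only [PySem.Set.len]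
  rw [show (PySem.Set.empty : PySem.Set Int) = ([] : List Int) from rfl]
  simp only [← PySem.Set.ofList_eq_foldl, length_ofList_filter]
  simp only [scoreB, h1, h2]
  have hlen := List.length_eq_length_filter_add (l := PySem.Set.ofList lst)
    (fun x => decide (x > 0))
  split_ifs with h
  · symm; rw [decide_eq_true_iff]
    push_cast at h ⊢; omega
  · symm; rw [decide_eq_false_iff_not]
    push_cast at h ⊢; omega
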